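-- pv_equiv track=rewrite | github.com/THRALLab/pedal-kennel | examples/chosen_problems_st3-3_as3-3_at1_v1/bakery_for_composition_code_highest_filter/submissions/Beedrill_29030778.py | high_score
-- ===== SOURCE A (Python) =====
-- def high_score(scores: [int]) -> int:
--     if [i for i in scores if i >= 100] == []:
--         return None
--     to_return = 100
--     for score in scores:
--         if score == -999:
--             break
--         elif score >= to_return:
--             to_return = score
--     return to_return
-- ===== SOURCE B (Python) =====
-- def high_score(scores: [int]) -> int:
--     seen_high = False
--     best = 100
--     stopped = False
--     for score in scores:
--         if score >= 100:
--             seen_high = True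
--         if not stopped:
--             if score == -999:
--                 stopped = True
--             else:
--                 best = max(best, score)
--     return best if seen_high else None
-- ===== Notes on version B (the rewrite author's own statement) =====
-- stated objective: alternative
-- what changed: B fuses A's two traversals (a full-list comprehension to test for a value >= 100, then a separate prefix loop for the max) into one pass keeping a seen_high flag, a best accumulator and a stopped flag at the first -999.
import Mathlib
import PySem

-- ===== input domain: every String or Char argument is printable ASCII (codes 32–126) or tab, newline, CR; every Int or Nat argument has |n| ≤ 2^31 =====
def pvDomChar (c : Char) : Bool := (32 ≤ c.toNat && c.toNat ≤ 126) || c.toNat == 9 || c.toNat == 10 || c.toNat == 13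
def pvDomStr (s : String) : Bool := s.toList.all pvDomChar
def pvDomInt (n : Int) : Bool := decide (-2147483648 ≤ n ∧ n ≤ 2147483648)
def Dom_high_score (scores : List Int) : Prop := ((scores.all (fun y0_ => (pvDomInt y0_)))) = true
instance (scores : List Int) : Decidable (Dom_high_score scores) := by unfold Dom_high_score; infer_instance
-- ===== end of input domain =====

-- B fuses A's two traversals (full-list >=100 test, then a separate prefix max loop up to the
-- first -999) into one pass with a seen_high flag, a best accumulator and a stopped flag.

-- ===== PORT A =====
-- the for-loop with break: accumulator to_return, stop at -999
def highScoreLoopA : List Int → Int → Int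
  | [], acc => acc
  | s :: rest, acc =>
    if s = -999 then acc
    else if s ≥ acc then highScoreLoopA rest s
    else highScoreLoopA rest acc

def high_score (scores : List Int) : Option Int :=
  if scores.filter (fun i => decide (i ≥ 100)) = [] then none
  else some (highScoreLoopA scores 100)

-- ===== PORT B =====
-- single fused pass: state (seen_high, best, stopped)
def highScoreLoopB : List Int → Bool × Int × Bool → Bool × Int × Bool
  | [], st => st
  | s :: rest, (seen, best, stopped) =>
    let seen' := if s ≥ 100 then true else seen
    let st' :=
      if !stopped then
        if s = -999 then (seen', best, true)
        else (seen', max best s, stopped)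
      else (seen', best, stopped)
    highScoreLoopB rest st'

def high_score_alt (scores : List Int) : Option Int :=
  let st := highScoreLoopB scores (false, 100, false)
  if st.1 then some st.2.1 else none

-- ===== PRECONDITION & SPEC =====
def Spec_high_score (scores : List Int) (out : Option Int) : Prop := out = high_score_alt scores
instance (scores : List Int) (out : Option Int) : Decidable (Spec_high_score scores out) := by unfold Spec_high_score; infer_instance

-- ===== CLAIM (what is proved, stated in full; the proofs are below) =====
def Claim_equal_high_score : Prop := ∀ (scores : List Int), Dom_high_score scores → Spec_high_score scores (high_score scores)

-- ===== LEMMAS AND PROOFS =====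

-- the seen flag after the fold records whether any element ≥ 100 occurs (anywhere in the list)
theorem loopB_fst (l : List Int) (seen : Bool) (best : Int) (stopped : Bool) :
    (highScoreLoopB l (seen, best, stopped)).1 = (seen || l.any (fun s => decide (s ≥ 100))) := by
  induction l generalizing seen best stopped with
  | nil => simp [highScoreLoopB]
  | cons s rest ih =>
    simp only [highScoreLoopB, List.any_cons]
    by_cases hs : s ≥ 100 <;> split_ifs <;> simp [ih, hs]

-- once stopped, best is frozen
theorem loopB_stopped (l : List Int) (seen : Bool) (best : Int) :
    (highScoreLoopB l (seen, best, true)).2.1 = best := by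
  induction l generalizing seen with
  | nil => rfl
  | cons s rest ih => simp [highScoreLoopB, ih]

-- while running, best computes the same prefix max as A's loop
theorem loopB_snd (l : List Int) (seen : Bool) (best : Int) :
    (highScoreLoopB l (seen, best, false)).2.1 = highScoreLoopA l best := by
  induction l generalizing seen best with
  | nil => rfl
  | cons s rest ih =>
    simp only [highScoreLoopB]
    by_cases h1 : s = -999
    · simp [highScoreLoopA, h1, loopB_stopped]
    · by_cases h2 : s ≥ best
      · have hm : max best s = s := max_eq_right h2
        rw [hm]
        simp [highScoreLoopA, h1, h2, ih]
      · have hm : max best s = best := max_eq_left (by omega)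
        rw [hm]
        simp [highScoreLoopA, h1, h2, ih]

-- A's emptiness test on the filtered list agrees with B's seen flag
theorem filter_nil_iff_any (scores : List Int) :
    (scores.filter (fun i => decide (i ≥ 100)) = []) ↔
      (scores.any (fun s => decide (s ≥ 100)) = false) := by
  simp [List.filter_eq_nil_iff, List.any_eq_false]

-- ===== VERDICT (by name: the statement is the Claim_ definition above) =====
theorem high_score_spec : Claim_equal_high_score := by
  intro scores _
  unfold Spec_high_score high_score high_score_alt
  simp only [loopB_fst, loopB_snd, Bool.false_or]
  by_cases h : scores.any (fun s => decide (s ≥ 100)) = true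
  · have hne : scores.filter (fun i => decide (i ≥ 100)) ≠ [] := by
      intro hf
      rw [filter_nil_iff_any] at hf
      simp [hf] at h
    simp [hne, h]
  · have hb : scores.any (fun s => decide (s ≥ 100)) = false := by
      simpa using h
    simp [filter_nil_iff_any scores |>.mpr hb, hb]
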